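-- pv_equiv track=rewrite | github.com/google88888888/teach20251126 | jj易教何子全python/project/test1/test.py | count_leading_spaces
-- ===== SOURCE A (Python) =====
-- def count_leading_spaces(s):
--     count = 0
--     for char in s:
--         if char == ' ':
--             count += 1
--         else:
--             break
--     return count
-- ===== SOURCE B (Python) =====
-- def count_leading_spaces(s):
--     return len(s) - len(s.lstrip(' '))
-- ===== Notes on version B (the rewrite author's own statement) =====
-- stated objective: idiomatic
-- what changed: Replaced the explicit counter loop with early break by a length difference against the string with leading spaces stripped, with no loop or counter.
import Mathlib
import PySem

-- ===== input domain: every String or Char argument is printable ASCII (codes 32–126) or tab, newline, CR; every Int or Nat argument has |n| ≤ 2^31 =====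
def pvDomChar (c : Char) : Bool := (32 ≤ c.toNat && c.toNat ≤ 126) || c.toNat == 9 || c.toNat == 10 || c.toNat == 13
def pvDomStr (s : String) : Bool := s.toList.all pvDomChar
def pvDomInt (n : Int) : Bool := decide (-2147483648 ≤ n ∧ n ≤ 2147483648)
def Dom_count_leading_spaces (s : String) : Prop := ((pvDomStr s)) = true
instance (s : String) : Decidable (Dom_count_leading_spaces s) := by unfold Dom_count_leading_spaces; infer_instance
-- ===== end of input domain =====

-- B replaces A's counter loop with early break by a length difference against the space-stripped string (idiomatic, no loop).

-- ===== PORT A =====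
-- the for-loop with break: count while the char is ' ', stop at the first other char
def countLoopA : List Char → Int → Int
  | [], count => count
  | c :: rest, count => if c = ' ' then countLoopA rest (count + 1) else count

def count_leading_spaces (s : String) : Int := countLoopA s.toList 0

-- ===== PORT B =====
-- len(s) - len(s.lstrip(' ')); lstrip(' ') drops exactly the leading ' ' chars: dropWhile (· == ' ') (exact)
def count_leading_spaces_alt (s : String) : Int :=
  (s.toList.length : Int) - ((s.toList.dropWhile (· == ' ')).length : Int)

-- ===== PRECONDITION & SPEC =====
def Spec_count_leading_spaces (s : String) (out : Int) : Prop := out = count_leading_spaces_alt s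
instance (s : String) (out : Int) : Decidable (Spec_count_leading_spaces s out) := by unfold Spec_count_leading_spaces; infer_instance

-- ===== CLAIM (what is proved, stated in full; the proofs are below) =====
def Claim_equal_count_leading_spaces : Prop := ∀ (s : String), Dom_count_leading_spaces s → Spec_count_leading_spaces s (count_leading_spaces s)

-- ===== LEMMAS AND PROOFS =====
theorem countLoopA_eq (l : List Char) (acc : Int) :
    countLoopA l acc = acc + ((l.length : Int) - ((l.dropWhile (· == ' ')).length : Int)) := by
  induction l generalizing acc with
  | nil => simp [countLoopA]
  | cons c rest ih =>
    by_cases h : c = ' '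
    · simp [countLoopA, h, List.dropWhile, ih]
      ring
    · have hb : (c == ' ') = false := by simp [h]
      simp [countLoopA, h, List.dropWhile, hb]

-- ===== VERDICT (by name: the statement is the Claim_ definition above) =====
theorem count_leading_spaces_spec : Claim_equal_count_leading_spaces := by
  intro s _
  unfold Spec_count_leading_spaces count_leading_spaces count_leading_spaces_alt
  rw [countLoopA_eq]
  ring
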